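-- pv_equiv track=rewrite | github.com/aaa2ppp/ya-algo-training8-pub | less4/i/main.py | calc_offsets
-- ===== SOURCE A (Python) =====
-- from typing import List, Tuple
--
-- def calc_squares(d: int) -> List[int]:
--     """Возвращает список всех квадратов (начиная с 0), <= d, в порядке возрастания."""
--     q = []
--     i = 0
--     while i * i <= d:
--         q.append(i * i)
--         i += 1
--     return q
--
-- def calc_square_sums(d: int) -> List[Tuple[int, int]]:
--     """
--     Возвращает список пар (a, b), таких что a^2 + b^2 == d и a <= b.
--     Здесь a и b — целые неотрицательные числа (корни, не квадраты!).
--     """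
--     q = calc_squares(d)
--     qs = []
--     i, j = 0, len(q) - 1
--     while i <= j:
--         c = q[i] + q[j]
--         if c < d:
--             i += 1
--         elif c > d:
--             j -= 1
--         else:
--             # q[i] = i*i, q[j] = j*j → пара (i, j)
--             qs.append((i, j))
--             j -= 1
--     return qs
--
-- def calc_offsets(d: int) -> List[Tuple[int, int]]:
--     """Возвращает все целочисленные смещения (dx, dy), такие что dx^2 + dy^2 == d."""
--     pairs = calc_square_sums(d)
--     offsets = []
--     for a, b in pairs:
--         if a == 0:
--             # (0, ±b), (±b, 0)
--             offsets.extend([(0, b), (0, -b), (b, 0), (-b, 0)])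
--         elif a == b:
--             # (±a, ±a) — 4 варианта
--             offsets.extend([(a, a), (a, -a), (-a, -a), (-a, a)])
--         else:
--             # Все комбинации знаков и перестановок — 8 штук
--             offsets.extend([
--                 (a, b), (a, -b), (-a, -b), (-a, b),
--                 (b, a), (b, -a), (-b, -a), (-b, a)
--             ])
--     return offsets
-- ===== SOURCE B (Python) =====
-- from typing import List, Tuple
--
-- def _isqrt(n: int) -> int:
--     """Floor square root of n >= 0 by binary search on [lo, hi): lo*lo <= n < hi*hi."""
--     lo, hi = 0, n + 1
--     while hi - lo > 1:
--         mid = (lo + hi) // 2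
--         if mid * mid <= n:
--             lo = mid
--         else:
--             hi = mid
--     return lo
--
-- def calc_offsets(d: int) -> List[Tuple[int, int]]:
--     """Возвращает все целочисленные смещения (dx, dy), такие что dx^2 + dy^2 == d."""
--     offsets = []
--     a = 0
--     while 2 * a * a <= d:
--         b2 = d - a * a
--         b = _isqrt(b2)
--         if b * b == b2:
--             if a == 0:
--                 offsets.extend([(0, b), (0, -b), (b, 0), (-b, 0)])
--             elif a == b:
--                 offsets.extend([(a, a), (a, -a), (-a, -a), (-a, a)])
--             else:
--                 offsets.extend([
--                     (a, b), (a, -b), (-a, -b), (-a, b),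
--                     (b, a), (b, -a), (-b, -a), (-b, a)
--                 ])
--         a += 1
--     return offsets
-- ===== Notes on version B (the rewrite author's own statement) =====
-- stated objective: simpler
-- what changed: Replaced the precomputed list of squares plus the two-pointer scan by a single loop over a that tests d-a*a for being a perfect square with a binary-search integer square root; the sign/permutation expansion is done inline as each pair is found.
import Mathlib
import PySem

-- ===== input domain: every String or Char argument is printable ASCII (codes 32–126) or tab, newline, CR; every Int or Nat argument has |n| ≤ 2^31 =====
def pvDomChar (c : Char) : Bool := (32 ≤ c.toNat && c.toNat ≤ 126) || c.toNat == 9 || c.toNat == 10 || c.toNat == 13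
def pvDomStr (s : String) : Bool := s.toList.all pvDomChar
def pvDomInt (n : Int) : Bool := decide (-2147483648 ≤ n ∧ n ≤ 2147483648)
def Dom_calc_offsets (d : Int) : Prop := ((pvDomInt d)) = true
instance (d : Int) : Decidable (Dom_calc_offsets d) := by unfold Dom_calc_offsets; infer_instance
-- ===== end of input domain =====

-- B replaces the squares list + two-pointer scan by one loop testing d-a*a for squareness
-- with a binary-search integer square root; same output, no speed claim.

-- termination helper for the while-loops (cited by the ports' decreasing_by)
theorem pv_le_of_sq_le (x d : Int) (h : x * x ≤ d) : x ≤ d := by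
  nlinarith [sq_nonneg (x - 1), mul_self_nonneg x]

-- ===== PORT A =====

-- while i*i <= d: q.append(i*i); i += 1
def calcSquaresLoop (d i : Int) (q : List Int) : List Int :=
  if i * i ≤ d then calcSquaresLoop d (i + 1) (q ++ [i * i]) else q
termination_by (d + 1 - i).toNat
decreasing_by have := pv_le_of_sq_le i d (by omega); omega

def calc_squares (d : Int) : List Int := calcSquaresLoop d 0 []

-- the two-pointer while-loop of calc_square_sums; q[i] via pyGet? (in range whenever
-- the Python reads it; .getD 0 only makes the function total)
def calcSquareSumsLoop (d : Int) (q : List Int) (i j : Int) (qs : List (Int × Int)) :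
    List (Int × Int) :=
  if i ≤ j then
    let c := (PySem.List.pyGet? q i).getD 0 + (PySem.List.pyGet? q j).getD 0
    if c < d then calcSquareSumsLoop d q (i + 1) j qs
    else if c > d then calcSquareSumsLoop d q i (j - 1) qs
    else calcSquareSumsLoop d q i (j - 1) (qs ++ [(i, j)])
  else qs
termination_by (j + 1 - i).toNat
decreasing_by all_goals omega

def calc_square_sums (d : Int) : List (Int × Int) :=
  let q := calc_squares d
  calcSquareSumsLoop d q 0 ((q.length : Int) - 1) []

def calc_offsets (d : Int) : List (Int × Int) :=
  (calc_square_sums d).foldl (fun offsets p =>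
    let a := p.1
    let b := p.2
    if a = 0 then offsets ++ [(0, b), (0, -b), (b, 0), (-b, 0)]
    else if a = b then offsets ++ [(a, a), (a, -a), (-a, -a), (-a, a)]
    else offsets ++ [(a, b), (a, -b), (-a, -b), (-a, b), (b, a), (b, -a), (-b, -a), (-b, a)]) []

-- ===== PORT B =====

-- binary search: lo*lo <= n < hi*hi
def pyIsqrtLoop (n lo hi : Int) : Int :=
  if hi - lo > 1 then
    let mid := PySem.Int.floordiv (lo + hi) 2
    if mid * mid ≤ n then pyIsqrtLoop n mid hi else pyIsqrtLoop n lo mid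
  else lo
termination_by (hi - lo).toNat
decreasing_by
  all_goals
    have := (PySem.Int.floordiv_two_mid_bounds (lo := lo + 1) (hi := hi - 1) (by omega))
    simp only [show lo + 1 + (hi - 1) = lo + hi by ring] at this
    omega

def pyIsqrt (n : Int) : Int := pyIsqrtLoop n 0 (n + 1)

-- while 2*a*a <= d: test d-a*a for being a perfect square, expand signs/permutations
def calcOffsetsAltLoop (d a : Int) (offsets : List (Int × Int)) : List (Int × Int) :=
  if 2 * a * a ≤ d then
    let b2 := d - a * a
    let b := pyIsqrt b2
    let offsets :=
      if b * b = b2 then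
        if a = 0 then offsets ++ [(0, b), (0, -b), (b, 0), (-b, 0)]
        else if a = b then offsets ++ [(a, a), (a, -a), (-a, -a), (-a, a)]
        else offsets ++ [(a, b), (a, -b), (-a, -b), (-a, b), (b, a), (b, -a), (-b, -a), (-b, a)]
      else offsets
    calcOffsetsAltLoop d (a + 1) offsets
  else offsets
termination_by (d + 1 - a).toNat
decreasing_by
  have haa : a * a ≤ d := by nlinarith [mul_self_nonneg a]
  have := pv_le_of_sq_le a d haa; omega

def calc_offsets_alt (d : Int) : List (Int × Int) := calcOffsetsAltLoop d 0 []

-- ===== PRECONDITION & SPEC =====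
def Spec_calc_offsets (d : Int) (out : List (Int × Int)) : Prop := out = calc_offsets_alt d
instance (d : Int) (out : List (Int × Int)) : Decidable (Spec_calc_offsets d out) := by unfold Spec_calc_offsets; infer_instance

-- ===== CLAIM (what is proved, stated in full; the proofs are below) =====
def Claim_equal_calc_offsets : Prop := ∀ (d : Int), Dom_calc_offsets d → Spec_calc_offsets d (calc_offsets d)

-- ===== LEMMAS AND PROOFS =====

-- the sign/permutation expansion of one pair (proof-side abbreviation of the shared branch bodies)
def pvExpand (p : Int × Int) : List (Int × Int) :=
  let a := p.1
  let b := p.2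
  if a = 0 then [(0, b), (0, -b), (b, 0), (-b, 0)]
  else if a = b then [(a, a), (a, -a), (-a, -a), (-a, a)]
  else [(a, b), (a, -b), (-a, -b), (-a, b), (b, a), (b, -a), (-b, -a), (-b, a)]

-- B's pair stream, with the expansion stripped off
def pvPairsFrom (d a : Int) : List (Int × Int) :=
  if 2 * a * a ≤ d then
    (if pyIsqrt (d - a * a) * pyIsqrt (d - a * a) = d - a * a then [(a, pyIsqrt (d - a * a))] else [])
      ++ pvPairsFrom d (a + 1)
  else []
termination_by (d + 1 - a).toNat
decreasing_by
  have haa : a * a ≤ d := by nlinarith [mul_self_nonneg a]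
  have := pv_le_of_sq_le a d haa; omega

-- cons form of A's squares list
def pvSqList (d i : Int) : List Int :=
  if i * i ≤ d then i * i :: pvSqList d (i + 1) else []
termination_by (d + 1 - i).toNat
decreasing_by have := pv_le_of_sq_le i d (by omega); omega

theorem calcSquaresLoop_eq (d i : Int) (q : List Int) :
    calcSquaresLoop d i q = q ++ pvSqList d i := by
  induction i, q using calcSquaresLoop.induct (d := d) with
  | case1 i q h ih =>
    rw [calcSquaresLoop, pvSqList]
    simp [h, ih]
  | case2 i q h =>
    rw [calcSquaresLoop, pvSqList]
    simp [h]

theorem pvSqList_ub (d i : Int) (hi : 0 ≤ i) :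
    d < (i + ((pvSqList d i).length : Int)) * (i + ((pvSqList d i).length : Int)) := by
  induction i using pvSqList.induct (d := d) with
  | case1 i h ih =>
    rw [pvSqList, if_pos h]
    have h2 := ih (by omega)
    simp only [List.length_cons] at *
    push_cast at *
    nlinarith [h2]
  | case2 i h =>
    rw [pvSqList, if_neg h]
    simpa using by omega

theorem pvSqList_get (d i : Int) (hi : 0 ≤ i) :
    ∀ k : Nat, k < (pvSqList d i).length →
      (pvSqList d i)[k]? = some ((i + k) * (i + k)) := by
  induction i using pvSqList.induct (d := d) with
  | case1 i h ih =>
    intro k hk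
    rw [pvSqList, if_pos h] at hk ⊢
    cases k with
    | zero => simp
    | succ k =>
      simp only [List.getElem?_cons_succ]
      have := ih (by omega) k (by simpa using hk)
      rw [this]
      congr 2 <;> push_cast <;> ring
  | case2 i h =>
    intro k hk
    rw [pvSqList, if_neg h] at hk
    simp at hk

theorem pyIsqrtLoop_spec (n : Int) : ∀ k : Nat, ∀ lo hi : Int, (hi - lo).toNat ≤ k →
    0 ≤ lo → lo < hi → lo * lo ≤ n → n < hi * hi →
    0 ≤ pyIsqrtLoop n lo hi ∧ pyIsqrtLoop n lo hi * pyIsqrtLoop n lo hi ≤ n ∧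
      n < (pyIsqrtLoop n lo hi + 1) * (pyIsqrtLoop n lo hi + 1) := by
  intro k
  induction k with
  | zero =>
    intro lo hi hk h0 hlt hlo hhi
    exact absurd hk (by omega)
  | succ k ih =>
    intro lo hi hk h0 hlt hlo hhi
    rw [pyIsqrtLoop]
    by_cases hg : hi - lo > 1
    · have hmid := PySem.Int.floordiv_two_mid_bounds (lo := lo + 1) (hi := hi - 1) (by omega)
      simp only [show lo + 1 + (hi - 1) = lo + hi by ring] at hmid
      by_cases hm : PySem.Int.floordiv (lo + hi) 2 * PySem.Int.floordiv (lo + hi) 2 ≤ n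
      · simp only [if_pos hg, if_pos hm]
        exact ih _ hi (by omega) (by omega) (by omega) hm hhi
      · simp only [if_pos hg, if_neg hm]
        exact ih lo _ (by omega) h0 (by omega) hlo (by omega)
    · rw [if_neg hg]
      refine ⟨h0, hlo, ?_⟩
      have hhe : hi = lo + 1 := by omega
      exact hhe ▸ hhi

theorem pyIsqrt_eq (n b : Int) (hb : 0 ≤ b) (h1 : b * b ≤ n) (h2 : n < (b + 1) * (b + 1)) :
    pyIsqrt n = b := by
  have hn : 0 ≤ n := le_trans (mul_self_nonneg b) h1
  have hs := pyIsqrtLoop_spec n (n + 1).toNat 0 (n + 1) (by omega) le_rfl (by omega) (by simpa using hn) (by nlinarith)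
  rw [pyIsqrt]
  set m := pyIsqrtLoop n 0 (n + 1) with hm
  obtain ⟨hm0, hm1, hm2⟩ := hs
  rcases lt_trichotomy m b with h | h | h
  · exfalso
    have := mul_self_le_mul_self (a := m + 1) (b := b) (by omega) (by omega)
    omega
  · exact h
  · exfalso
    have := mul_self_le_mul_self (a := b + 1) (b := m) (by omega) (by omega)
    omega

theorem pyIsqrt_spec (n : Int) (hn : 0 ≤ n) :
    0 ≤ pyIsqrt n ∧ pyIsqrt n * pyIsqrt n ≤ n ∧ n < (pyIsqrt n + 1) * (pyIsqrt n + 1) :=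
  pyIsqrtLoop_spec n (n + 1).toNat 0 (n + 1) (by omega) le_rfl (by omega) (by simpa using hn) (by nlinarith)

theorem pvPairsFrom_nil (d : Int) : ∀ i : Int, 0 ≤ i →
    (∀ a b : Int, i ≤ a → a ≤ b → a * a + b * b ≠ d) → pvPairsFrom d i = [] := by
  intro i
  induction i using pvPairsFrom.induct (d := d) with
  | case1 a hg ih =>
    intro ha h
    rw [pvPairsFrom, if_pos hg]
    have hb2 : 0 ≤ d - a * a := by nlinarith [mul_self_nonneg a]
    obtain ⟨hb0, hb1, hb2'⟩ := pyIsqrt_spec (d - a * a) hb2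
    have hab : a ≤ pyIsqrt (d - a * a) := by
      by_contra hc
      have := mul_self_le_mul_self (a := pyIsqrt (d - a * a) + 1) (b := a) (by omega) (by omega)
      nlinarith [mul_self_nonneg a]
    rw [if_neg, List.nil_append]
    · exact ih (by omega) (fun x y hx hy => h x y (by omega) hy)
    · intro hsq
      exact h a (pyIsqrt (d - a * a)) le_rfl hab (by omega)
  | case2 a hg =>
    intro _ _
    rw [pvPairsFrom, if_neg hg]

theorem tpMain (d : Int) (q : List Int)
    (hget : ∀ t : Int, 0 ≤ t → t < (q.length : Int) →
      PySem.List.pyGet? q t = some (t * t)) :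
    ∀ n : Nat, ∀ i j : Int, ∀ qs : List (Int × Int), 0 ≤ i → j < (q.length : Int) →
      (∀ a b : Int, i ≤ a → a ≤ b → j < b → a * a + b * b ≠ d) →
      (j + 1 - i).toNat ≤ n →
      calcSquareSumsLoop d q i j qs = qs ++ pvPairsFrom d i := by
  intro n
  induction n with
  | zero =>
    intro i j qs h0 hjn H2 hk
    rw [calcSquareSumsLoop, if_neg (by omega : ¬ i ≤ j),
      pvPairsFrom_nil d i h0 (fun a b ha hab => H2 a b ha hab (by omega)), List.append_nil]
  | succ n ih =>
    intro i j qs h0 hjn H2 hk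
    rw [calcSquareSumsLoop]
    by_cases hij : i ≤ j
    · rw [if_pos hij]
      simp only [hget i h0 (by omega), hget j (by omega) hjn, Option.getD_some]
      have hii_jj : i * i ≤ j * j := mul_self_le_mul_self h0 hij
      by_cases h1 : i * i + j * j < d
      · rw [if_pos h1]
        have hstep : pvPairsFrom d i = pvPairsFrom d (i + 1) := by
          rw [pvPairsFrom, if_pos (by nlinarith : 2 * i * i ≤ d)]
          rw [if_neg ?hc, List.nil_append]
          case hc =>
            intro hsq
            have hb2 : 0 ≤ d - i * i := by linarith [mul_self_nonneg i]
            obtain ⟨hb0, _, hb3⟩ := pyIsqrt_spec _ hb2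
            by_cases hbj : pyIsqrt (d - i * i) ≤ j
            · have := mul_self_le_mul_self hb0 hbj
              nlinarith
            · refine H2 i (pyIsqrt (d - i * i)) le_rfl ?_ (by omega) (by omega)
              by_contra hc2
              have := mul_self_le_mul_self (a := pyIsqrt (d - i * i) + 1) (b := i)
                (by omega) (by omega)
              omega
        rw [hstep]
        exact ih (i + 1) j qs (by omega) hjn (fun a b ha => H2 a b (by omega)) (by omega)
      · rw [if_neg h1]
        by_cases h2 : i * i + j * j > d
        · rw [if_pos h2]
          refine ih i (j - 1) qs h0 (by omega) ?_ (by omega)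
          intro a b ha hab hbj
          by_cases hbj' : j < b
          · exact H2 a b ha hab hbj'
          · have hbj2 : b = j := by omega
            subst hbj2
            have := mul_self_le_mul_self h0 ha
            omega
        · -- c = d
          have hcd : i * i + j * j = d := by omega
          have hj0 : 0 ≤ j := by omega
          have hbeq : pyIsqrt (d - i * i) = j :=
            pyIsqrt_eq _ j hj0 (by omega) (by nlinarith)
          have hpf : pvPairsFrom d i = (i, j) :: pvPairsFrom d (i + 1) := by
            rw [pvPairsFrom, if_pos (by nlinarith : 2 * i * i ≤ d)]
            rw [hbeq]
            rw [if_pos (by linarith : j * j = d - i * i)]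
            rfl
          rw [if_neg (by omega : ¬ i * i + j * j > d), hpf]
          by_cases hij2 : i = j
          · subst hij2
            rw [calcSquareSumsLoop, if_neg (by omega : ¬ i ≤ i - 1)]
            have hnil : pvPairsFrom d (i + 1) = [] := by
              refine pvPairsFrom_nil d (i + 1) (by omega) ?_
              intro a b ha hab heq
              have h3 := mul_self_le_mul_self (by omega : (0:Int) ≤ i + 1) ha
              have h4 := mul_self_le_mul_self (by omega : (0:Int) ≤ a) hab
              nlinarith
            rw [hnil]
          · have hlt2 : i < j := lt_of_le_of_ne hij hij2
            rw [calcSquareSumsLoop, if_pos (by omega : i ≤ j - 1)]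
            simp only [hget i h0 (by omega), hget (j - 1) (by omega) (by omega),
              Option.getD_some]
            rw [if_pos (by nlinarith : i * i + (j - 1) * (j - 1) < d)]
            have hH2' : ∀ a b : Int, i + 1 ≤ a → a ≤ b → j - 1 < b → a * a + b * b ≠ d := by
              intro a b ha hab hbj
              by_cases hbj' : j < b
              · exact H2 a b (by omega) hab hbj'
              · have hbj2 : b = j := by omega
                subst hbj2
                have := mul_self_lt_mul_self h0 (by omega : i < a)
                omega
            rw [ih (i + 1) (j - 1) (qs ++ [(i, j)]) (by omega) (by omega) hH2' (by omega)]
            simp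
    · rw [if_neg hij,
        pvPairsFrom_nil d i h0 (fun a b ha hab => H2 a b ha hab (by omega)), List.append_nil]

theorem calc_squares_eq (d : Int) : calc_squares d = pvSqList d 0 := by
  rw [calc_squares, calcSquaresLoop_eq, List.nil_append]

theorem calc_square_sums_eq (d : Int) : calc_square_sums d = pvPairsFrom d 0 := by
  rw [calc_square_sums]
  have hq : calc_squares d = pvSqList d 0 := calc_squares_eq d
  simp only [hq]
  have hget : ∀ t : Int, 0 ≤ t → t < ((pvSqList d 0).length : Int) →
      PySem.List.pyGet? (pvSqList d 0) t = some (t * t) := by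
    intro t ht hlen
    have hge := PySem.List.pyGet?_of_nonneg (pvSqList d 0) ht
    rw [hge, pvSqList_get d 0 le_rfl t.toNat (by omega)]
    congr 2 <;> omega
  refine tpMain d (pvSqList d 0) hget ((pvSqList d 0).length) 0 _ [] le_rfl (by omega) ?_ (by omega)
  intro a b ha hab hbj
  have hub := pvSqList_ub d 0 le_rfl
  have h1 := mul_self_le_mul_self (by omega : (0:Int) ≤ ((pvSqList d 0).length : Int))
    (by omega : ((pvSqList d 0).length : Int) ≤ b)
  have h2 := mul_self_nonneg a
  simp only [zero_add] at hub
  omega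

theorem foldl_expand (l : List (Int × Int)) (acc : List (Int × Int)) :
    l.foldl (fun offsets p =>
      let a := p.1
      let b := p.2
      if a = 0 then offsets ++ [(0, b), (0, -b), (b, 0), (-b, 0)]
      else if a = b then offsets ++ [(a, a), (a, -a), (-a, -a), (-a, a)]
      else offsets ++ [(a, b), (a, -b), (-a, -b), (-a, b), (b, a), (b, -a), (-b, -a), (-b, a)]) acc
      = acc ++ l.flatMap pvExpand := by
  induction l generalizing acc with
  | nil => simp
  | cons p l ih =>
    rw [List.foldl_cons, ih, List.flatMap_cons]
    simp only [pvExpand]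
    split_ifs <;> simp

theorem altLoop_eq (d : Int) : ∀ k : Nat, ∀ a : Int, (d + 1 - a).toNat ≤ k →
    ∀ offsets : List (Int × Int),
    calcOffsetsAltLoop d a offsets = offsets ++ (pvPairsFrom d a).flatMap pvExpand := by
  intro k
  induction k with
  | zero =>
    intro a hk offsets
    have hg : ¬ 2 * a * a ≤ d := by
      intro h
      have h1 : a * a ≤ d := by nlinarith [mul_self_nonneg a]
      have := pv_le_of_sq_le a d h1
      omega
    rw [calcOffsetsAltLoop, pvPairsFrom, if_neg hg, if_neg hg]
    simp
  | succ k ih =>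
    intro a hk offsets
    rw [calcOffsetsAltLoop, pvPairsFrom]
    by_cases hg : 2 * a * a ≤ d
    · have ha_le : a ≤ d := pv_le_of_sq_le a d (by nlinarith [mul_self_nonneg a])
      simp only [if_pos hg, ih (a + 1) (by omega)]
      by_cases hsq : pyIsqrt (d - a * a) * pyIsqrt (d - a * a) = d - a * a
      · simp only [if_pos hsq]
        have hpv : pvExpand (a, pyIsqrt (d - a * a)) =
            if a = 0 then [((0:Int), pyIsqrt (d - a * a)), (0, -pyIsqrt (d - a * a)),
              (pyIsqrt (d - a * a), 0), (-pyIsqrt (d - a * a), 0)]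
            else if a = pyIsqrt (d - a * a) then [(a, a), (a, -a), (-a, -a), (-a, a)]
            else [(a, pyIsqrt (d - a * a)), (a, -pyIsqrt (d - a * a)),
              (-a, -pyIsqrt (d - a * a)), (-a, pyIsqrt (d - a * a)),
              (pyIsqrt (d - a * a), a), (pyIsqrt (d - a * a), -a),
              (-pyIsqrt (d - a * a), -a), (-pyIsqrt (d - a * a), a)] := rfl
        rw [List.flatMap_append, List.flatMap_singleton, hpv]
        split_ifs <;> simp [List.append_assoc]
      · simp only [if_neg hsq]
        simp
    · rw [if_neg hg, if_neg hg]
      simp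

-- ===== VERDICT (by name: the statement is the Claim_ definition above) =====
theorem calc_offsets_spec : Claim_equal_calc_offsets := by
  intro d _
  unfold Spec_calc_offsets calc_offsets calc_offsets_alt
  rw [calc_square_sums_eq, foldl_expand, altLoop_eq d (d + 1).toNat 0 (by omega) []]
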